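-- pv_equiv track=rewrite | github.com/MesbahAyoubRayane/PKmean2 | main.py | divide_data_set
-- ===== SOURCE A (Python) =====
-- def divide_data_set(dataset_length:int,number_of_process:int):
--     """
--     This function return a list of tuple[start,end]
--     """
--     step = dataset_length // number_of_process
--     start , end = 0,step
--     positions = []
--     while len(positions) < number_of_process:
--         positions.append((start,end))
--         start, end = end,end + step
--     last_position = positions.pop()
--     positions.append((last_position[0],dataset_length))
--     return positions
-- ===== SOURCE B (Python) =====
-- def divide_data_set(dataset_length: int, number_of_process: int):
--     """
--     This function return a list of tuple[start,end]
--     """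
--     step = dataset_length // number_of_process
--     end = (number_of_process - 1) * step
--     positions = [(end, dataset_length)]
--     while len(positions) < number_of_process:
--         positions.append((end - step, end))
--         end -= step
--     positions.reverse()
--     return positions
-- ===== Notes on version B (the rewrite author's own statement) =====
-- stated objective: alternative
-- what changed: Builds the chunk list back-to-front: it starts from the final chunk ((k-1)*step, dataset_length), walks the end cursor downward appending each earlier chunk, and reverses once at the end, eliminating A's forward accumulator loop and its pop/append fix-up of the last chunk.
import Mathlib
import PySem

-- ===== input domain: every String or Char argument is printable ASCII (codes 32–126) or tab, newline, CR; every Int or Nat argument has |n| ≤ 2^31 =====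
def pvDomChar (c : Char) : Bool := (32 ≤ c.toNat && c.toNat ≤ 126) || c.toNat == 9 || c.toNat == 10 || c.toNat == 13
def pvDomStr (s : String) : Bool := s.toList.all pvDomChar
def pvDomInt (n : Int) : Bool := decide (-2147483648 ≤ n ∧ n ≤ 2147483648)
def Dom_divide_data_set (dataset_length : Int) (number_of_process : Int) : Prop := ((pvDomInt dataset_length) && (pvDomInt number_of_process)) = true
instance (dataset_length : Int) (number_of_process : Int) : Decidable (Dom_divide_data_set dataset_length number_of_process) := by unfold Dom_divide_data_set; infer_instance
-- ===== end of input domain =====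

-- B builds the chunk list back-to-front from the final chunk, with no pop/append fix-up; same cost.

-- ===== PORT A =====
-- A's while-loop: appends (start,end) once per iteration, so starting from [] it runs
-- exactly number_of_process times; fuel = number_of_process.toNat.
def divideLoopA (step : Int) : Nat → Int → Int → List (Int × Int) → List (Int × Int)
  | 0, _, _, acc => acc
  | k + 1, start, e, acc => divideLoopA step k e (e + step) (acc ++ [(start, e)])

-- last = positions.pop(); positions.append((last[0], dataset_length)); pop on [] is IndexError (excluded by Pre_)
def popAppendA (dataset_length : Int) (positions : List (Int × Int)) : List (Int × Int) :=
  match positions.getLast? with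
  | some last => positions.dropLast ++ [(last.1, dataset_length)]
  | none => []

def divide_data_set (dataset_length : Int) (number_of_process : Int) : List (Int × Int) :=
  popAppendA dataset_length
    (divideLoopA (PySem.Int.floordiv dataset_length number_of_process) number_of_process.toNat
      0 (PySem.Int.floordiv dataset_length number_of_process) [])

-- ===== PORT B =====
-- B's while-loop: starting from the final chunk, appends one earlier chunk per iteration
-- walking the end cursor down; len grows from 1, so it runs (number_of_process - 1).toNat
-- times; then positions.reverse().
def buildLoopB (step : Int) : Nat → Int → List (Int × Int) → List (Int × Int)
  | 0, _, positions => positions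
  | m + 1, e, positions => buildLoopB step m (e - step) (positions ++ [(e - step, e)])

def divide_data_set_alt (dataset_length : Int) (number_of_process : Int) : List (Int × Int) :=
  let step := PySem.Int.floordiv dataset_length number_of_process
  (buildLoopB step (number_of_process - 1).toNat ((number_of_process - 1) * step)
    [((number_of_process - 1) * step, dataset_length)]).reverse

-- ===== PRECONDITION & SPEC =====
-- Pre_: number_of_process ≥ 1. For number_of_process ≤ 0 A raises (ZeroDivisionError at 0, IndexError on pop below 0).
def Pre_divide_data_set (dataset_length : Int) (number_of_process : Int) : Prop := 1 ≤ number_of_process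
instance (dataset_length : Int) (number_of_process : Int) : Decidable (Pre_divide_data_set dataset_length number_of_process) := by unfold Pre_divide_data_set; infer_instance
def pvWitness_divide_data_set : Int × Int := (10, 3)

def Spec_divide_data_set (dataset_length : Int) (number_of_process : Int) (out : List (Int × Int)) : Prop := out = divide_data_set_alt dataset_length number_of_process
instance (dataset_length : Int) (number_of_process : Int) (out : List (Int × Int)) : Decidable (Spec_divide_data_set dataset_length number_of_process out) := by unfold Spec_divide_data_set; infer_instance

-- ===== CLAIM (what is proved, stated in full; the proofs are below) =====
def Claim_equal_divide_data_set : Prop := ∀ (dataset_length : Int) (number_of_process : Int), Dom_divide_data_set dataset_length number_of_process → Pre_divide_data_set dataset_length number_of_process → Spec_divide_data_set dataset_length number_of_process (divide_data_set dataset_length number_of_process)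

-- ===== LEMMAS AND PROOFS =====

-- A's loop started at chunk index j produces chunks j..j+k-1 in index-arithmetic form.
theorem divideLoopA_eq (step : Int) (k : Nat) :
    ∀ (j : Int) (acc : List (Int × Int)),
    divideLoopA step k (j * step) ((j + 1) * step) acc
      = acc ++ (List.range k).map (fun (i : Nat) => ((j + (i : Int)) * step, (j + (i : Int) + 1) * step)) := by
  induction k with
  | zero => intro j acc; simp [divideLoopA]
  | succ k ih =>
    intro j acc
    have h1 : (j + 1) * step + step = ((j + 1) + 1) * step := by ring
    rw [divideLoopA, h1, ih (j + 1)]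
    rw [List.range_succ_eq_map, List.map_cons, List.map_map, List.append_assoc,
        List.singleton_append]
    congr 1
    congr 1
    · simp
    · refine List.map_congr_left (fun i _ => ?_)
      simp only [Function.comp, Prod.mk.injEq]
      constructor <;> (push_cast; ring)

-- B's loop with m appends remaining and end cursor at j*step appends chunks (j-1) down to (j-m).
theorem buildLoopB_eq (step : Int) (m : Nat) :
    ∀ (j : Int) (pos : List (Int × Int)),
    buildLoopB step m (j * step) pos
      = pos ++ (List.range m).map
          (fun (i : Nat) => ((j - (i : Int) - 1) * step, (j - (i : Int)) * step)) := by
  induction m with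
  | zero => intro j pos; simp [buildLoopB]
  | succ m ih =>
    intro j pos
    have h1 : j * step - step = (j - 1) * step := by ring
    rw [buildLoopB, h1, ih (j - 1)]
    rw [List.range_succ_eq_map, List.map_cons, List.map_map, List.append_assoc,
        List.singleton_append]
    congr 2
    · congr 2 <;> ring
    · refine List.map_congr_left (fun i _ => ?_)
      simp only [Function.comp, Prod.mk.injEq]
      constructor <;> (push_cast; ring)

-- reversing B's descending chunk list gives A's ascending chunk list
theorem revMapB (step : Int) (k : Nat) :
    (List.map (fun (i : Nat) => (((k : Int) - (i : Int) - 1) * step, ((k : Int) - (i : Int)) * step))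
      (List.range k)).reverse
      = List.map (fun (i : Nat) => ((0 + (i : Int)) * step, (0 + (i : Int) + 1) * step))
          (List.range k) := by
  refine List.ext_getElem (by simp) (fun i h1 h2 => ?_)
  rw [List.getElem_reverse]
  simp only [List.length_reverse, List.length_map, List.length_range] at h1 h2 ⊢
  simp only [List.getElem_map, List.getElem_range]
  have hc : ((k - 1 - i : Nat) : Int) = (k : Int) - 1 - (i : Int) := by omega
  rw [hc]
  simp only [Prod.mk.injEq]
  constructor <;> ring

theorem divide_data_set_spec : Claim_equal_divide_data_set := by
  intro d n _hd hn
  have hn' : 1 ≤ n := hn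
  unfold Spec_divide_data_set divide_data_set divide_data_set_alt
  set step := PySem.Int.floordiv d n with hstep
  obtain ⟨k, hk⟩ : ∃ k : Nat, n.toNat = k + 1 := ⟨n.toNat - 1, by omega⟩
  have hA := divideLoopA_eq step (k + 1) 0 []
  rw [zero_mul, zero_add, one_mul] at hA
  rw [hk, hA, List.nil_append]
  rw [List.range_succ, List.map_append, List.map_singleton]
  unfold popAppendA
  rw [List.getLast?_concat, List.dropLast_concat]
  have hj : (n - 1) = (k : Int) := by omega
  simp only [hj]
  rw [Int.toNat_natCast, buildLoopB_eq step k (k : Int)]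
  rw [List.reverse_append, List.reverse_singleton, revMapB]
  simp only [zero_add]
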